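-- pv_equiv track=rewrite | github.com/keshav47/NER-flask | app.py | get_seq_attributes
-- ===== SOURCE A (Python) =====
-- def get_correct_attribute(target,data):
--     temp_seq = ''
--     temp_label = data[target]
--     temp_index = -1
--     for i in list(data.keys())[list(data.keys()).index(target):]:
--         try:
--             if data[i] == temp_label:
--                 temp_seq = temp_seq+' '+i
--
--             else:
--                 temp_index = list(data.keys()).index(i)
--                 break
--         except:
--             pass
--     return [[temp_seq.strip(),temp_label],temp_index]
--
-- def get_seq_attributes(data):
--     output={}
--     target = list(data.keys())[0]
--     flag = 0
--     while flag!=1: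
--         seq,next_index = get_correct_attribute(target,data)
--         target = list(data.keys())[next_index]
--
--         try:
--             output[seq[1]].append(seq[0])
--         except:
--             output[seq[1]] = [seq[0]]
--
--         if next_index == -1:
--             flag = 1
--     try:
--     	del output['X']
--     except:
--         pass
--     try:
--
--         del output['O']
--     except:
--         pass
--     return output
-- ===== SOURCE B (Python) =====
-- def get_seq_attributes(data):
--     output = {}
--     run = []          # keys of the current run of equal labels
--     label = None
--     for k, v in data.items():
--         if run and v == label:
--             run.append(k)
--         else:
--             if run:
--                 output.setdefault(label, []).append(' '.join(run).strip())
--             run = [k]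
--             label = v
--     if run:
--         output.setdefault(label, []).append(' '.join(run).strip())
--     output.pop('X', None)
--     output.pop('O', None)
--     return output
-- ===== Notes on version B (the rewrite author's own statement) =====
-- stated objective: faster
-- what changed: Replaces A's restart-at-target scans over list(data.keys()) with repeated .index() lookups by a single linear fold over the ordered items that carries the current run of equal labels.
-- crash fix: On the empty dict A raises IndexError (list(data.keys())[0]); B returns {}. — e.g. on get_seq_attributes([]): A raises IndexError, B returns []
import Mathlib
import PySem

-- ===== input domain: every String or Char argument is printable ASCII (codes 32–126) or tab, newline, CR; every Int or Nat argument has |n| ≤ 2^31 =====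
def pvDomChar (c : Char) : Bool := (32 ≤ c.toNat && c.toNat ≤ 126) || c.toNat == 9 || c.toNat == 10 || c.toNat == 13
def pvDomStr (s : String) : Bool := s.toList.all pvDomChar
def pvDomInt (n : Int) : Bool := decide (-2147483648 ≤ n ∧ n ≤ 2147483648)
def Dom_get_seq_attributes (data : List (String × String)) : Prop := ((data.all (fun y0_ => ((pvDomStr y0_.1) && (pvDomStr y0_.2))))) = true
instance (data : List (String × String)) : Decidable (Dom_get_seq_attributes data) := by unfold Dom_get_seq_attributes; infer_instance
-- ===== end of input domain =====

-- B replaces A's restart-at-key scans with repeated list(data.keys()).index lookups by ONE linear fold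
-- over the ordered items carrying the current run (objective: faster). Neither version mutates its argument.

-- ===== PORT A =====
-- the 'for i in list(data.keys())[...]:' body of get_correct_attribute; temp_seq carried as List Char;
-- the try/except inside the loop can never fire (i is always a key of data), so it is not modelled
def pvGcaLoop (d : PySem.Dict String String) (keys : List String) (tempLabel : String) :
    List String → List Char → List Char × Int
  | [], tempSeq => (tempSeq, -1)                                   -- loop ends, temp_index still -1
  | i :: rest, tempSeq =>
      if d.getD i "" == tempLabel then                              -- data[i] == temp_label (i is always a key)
        pvGcaLoop d keys tempLabel rest (tempSeq ++ [' '] ++ i.toList)  -- temp_seq = temp_seq+' '+i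
      else
        (tempSeq, ((PySem.List.index? keys i).getD 0 : Nat))        -- temp_index = keys.index(i); break

def get_correct_attribute (target : String) (data : List (String × String)) :
    (String × String) × Int :=
  let d := PySem.Dict.mk data
  let keys := d.keys
  let tempLabel := d.getD target ""                                 -- data[target] (target is always a key)
  let start := (PySem.List.index? keys target).getD 0               -- keys.index(target)
  let r := pvGcaLoop d keys tempLabel (keys.drop start) []          -- keys[start:]
  ((String.ofList (PySem.Chars.strip r.1), tempLabel), r.2)         -- [[temp_seq.strip(), temp_label], temp_index]

-- the 'while flag != 1:' loop; the fuel only makes the recursion total (data.length + 1 provably suffices)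
def pvGsaLoop (data : List (String × String)) :
    PySem.Dict String (List String) → String → Nat → PySem.Dict String (List String)
  | output, _, 0 => output
  | output, target, fuel + 1 =>
      let r := get_correct_attribute target data
      let keys := (PySem.Dict.mk data).keys
      let target' := ((PySem.List.pyGet? keys r.2).getD "")         -- target = list(data.keys())[next_index]
      let output' := output.modify r.1.2 [] (· ++ [r.1.1])          -- try append / except: first assignment
      if r.2 == -1 then output' else pvGsaLoop data output' target' fuel

def get_seq_attributes (data : List (String × String)) : List (String × List String) :=
  let keys := (PySem.Dict.mk data).keys
  let target := (PySem.List.pyGet? keys 0).getD ""                  -- list(data.keys())[0] (raises on {}: excluded by Pre_)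
  let out := pvGsaLoop data PySem.Dict.empty target (data.length + 1)
  ((out.erase "X").erase "O").items                                 -- del output['X'] / del output['O'] (try/except pass)

-- ===== PORT B =====
-- single linear pass: the fold state is (output, keys of the current run, its label);
-- the label component is only ever read while the run is nonempty (Python's 'label = None' start)
def pvFlush (output : PySem.Dict String (List String)) (run : List String) (label : String) :
    PySem.Dict String (List String) :=
  if run = [] then output
  else output.modify label [] (· ++ [PySem.Str.strip (PySem.Str.join " " run)])  -- setdefault(label, []).append(' '.join(run).strip())

def pvStep (st : PySem.Dict String (List String) × List String × String) (p : String × String) :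
    PySem.Dict String (List String) × List String × String :=
  if st.2.1 ≠ [] ∧ p.2 == st.2.2 then (st.1, st.2.1 ++ [p.1], st.2.2)   -- run and v == label: run.append(k)
  else (pvFlush st.1 st.2.1 st.2.2, [p.1], p.2)                         -- flush the finished run, start a new one

def get_seq_attributes_alt (data : List (String × String)) : List (String × List String) :=
  let st := data.foldl pvStep (PySem.Dict.empty, [], "")
  let out := pvFlush st.1 st.2.1 st.2.2                              -- final 'if run:' flush
  ((out.erase "X").erase "O").items                                  -- output.pop('X', None) / pop('O', None)

-- ===== PRECONDITION & SPEC =====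
-- data ≠ []: on the empty dict A raises IndexError (list(data.keys())[0]).
-- Nodup: the Python argument is a dict, which cannot hold duplicate keys — the Nodup conjunct is the
-- dict-representation invariant of the association list, not a narrowing of A's domain.
def Pre_get_seq_attributes (data : List (String × String)) : Prop :=
  data ≠ [] ∧ (data.map Prod.fst).Nodup
instance (data : List (String × String)) : Decidable (Pre_get_seq_attributes data) := by
  unfold Pre_get_seq_attributes; infer_instance

def pvWitness_get_seq_attributes : (List (String × String)) :=
  [("New", "B-LOC"), ("York", "B-LOC"), ("is", "O"), ("big", "A")]

-- On the empty dict A raises IndexError (list(data.keys())[0]); B returns the empty dict.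
def Raises_get_seq_attributes (data : List (String × String)) : Prop := data = []
instance (data : List (String × String)) : Decidable (Raises_get_seq_attributes data) := by
  unfold Raises_get_seq_attributes; infer_instance
def pvRaiseWitness_get_seq_attributes : (List (String × String)) := []
def pvRaiseWitnessOut_get_seq_attributes : List (String × List String) := []

def Spec_get_seq_attributes (data : List (String × String)) (out : List (String × List String)) : Prop :=
  out = get_seq_attributes_alt data
instance (data : List (String × String)) (out : List (String × List String)) :
    Decidable (Spec_get_seq_attributes data out) := by
  unfold Spec_get_seq_attributes; infer_instance

-- ===== CLAIM (what is proved, stated in full; the proofs are below) =====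
def Claim_equal_get_seq_attributes : Prop :=
  ∀ (data : List (String × String)), Dom_get_seq_attributes data →
    Pre_get_seq_attributes data → Spec_get_seq_attributes data (get_seq_attributes data)

def Claim_raises_get_seq_attributes : Prop :=
  (∀ (data : List (String × String)), Dom_get_seq_attributes data →
      Raises_get_seq_attributes data → ¬ Pre_get_seq_attributes data) ∧
  (Dom_get_seq_attributes (pvRaiseWitness_get_seq_attributes) ∧
   Raises_get_seq_attributes (pvRaiseWitness_get_seq_attributes) ∧
   get_seq_attributes_alt (pvRaiseWitness_get_seq_attributes) = pvRaiseWitnessOut_get_seq_attributes)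

-- ===== LEMMAS AND PROOFS =====

-- the string A builds for one run, in B's form
def pvSeqOf (ks : List String) : String := PySem.Str.strip (PySem.Str.join " " ks)

-- the common run-by-run normal form both loops are reduced to
def pvRunsGo : List (String × String) → PySem.Dict String (List String) → PySem.Dict String (List String)
  | [], out => out
  | (k, label) :: rest, out =>
      pvRunsGo (rest.dropWhile (fun p => p.2 == label))
        (out.modify label [] (· ++ [pvSeqOf (k :: (rest.takeWhile (fun p => p.2 == label)).map (·.1))]))
  termination_by suf _ => suf.length
  decreasing_by
    exact Nat.lt_succ_of_le (List.length_dropWhile_le _ _)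

def pvRuns (out : PySem.Dict String (List String)) (run : List String) (label : String)
    (suf : List (String × String)) : PySem.Dict String (List String) :=
  pvRunsGo (suf.dropWhile (fun p => p.2 == label))
    (out.modify label [] (· ++ [pvSeqOf (run ++ (suf.takeWhile (fun p => p.2 == label)).map (·.1))]))

-- ---- string side: A's ' '+k1+' '+k2+… stripped is B's ' '.join([k1,…]).strip() ----

theorem pvFlat_eq_join (k : String) (r : List String) :
    PySem.Chars.join [' '] ((k :: r).map String.toList)
      = k.toList ++ r.flatMap (fun s => ' ' :: s.toList) := by
  induction r generalizing k with
  | nil => simp [PySem.Chars.join_singleton]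
  | cons b r ih =>
      simp only [List.map_cons]
      rw [PySem.Chars.join_cons_cons, ← List.map_cons, ih b]
      simp

theorem pvStrip_space (l : List Char) :
    PySem.Chars.strip (' ' :: l) = PySem.Chars.strip l := by
  simp [PySem.Chars.strip, PySem.Chars.lstrip, PySem.Chars.isspace]

theorem pvSeq_eq (k : String) (r : List String) :
    String.ofList (PySem.Chars.strip ((k :: r).flatMap (fun s => ' ' :: s.toList)))
      = pvSeqOf (k :: r) := by
  apply String.toList_inj.mp
  have h1 : (String.ofList (PySem.Chars.strip ((k :: r).flatMap (fun s => ' ' :: s.toList)))).toList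
      = PySem.Chars.strip ((k :: r).flatMap (fun s => ' ' :: s.toList)) := by simp
  rw [h1, pvSeqOf, PySem.Str.toList_strip]
  have hj : (PySem.Str.join " " (k :: r)).toList = PySem.Chars.join [' '] ((k :: r).map String.toList) := by
    simp [PySem.Str.toList_join]
  rw [hj, pvFlat_eq_join]
  have hf : (k :: r).flatMap (fun s => ' ' :: s.toList) = ' ' :: (k.toList ++ r.flatMap (fun s => ' ' :: s.toList)) := by
    simp
  rw [hf, pvStrip_space]

-- ---- dict-lookup facts under Nodup keys ----

theorem pvKeys_eq (data : List (String × String)) :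
    (PySem.Dict.mk data).keys = data.map Prod.fst := by
  simp [PySem.Dict.keys]

theorem pvGetD_eq (data : List (String × String)) (k v : String)
    (hnd : (data.map Prod.fst).Nodup) (hm : (k, v) ∈ data) :
    (PySem.Dict.mk data).getD k "" = v := by
  apply PySem.Dict.getD_of_mem_items
  · exact hm
  · rw [pvKeys_eq]; exact hnd

-- ---- A's inner loop computes the run and the break index ----

theorem pvGcaLoop_spec (data pre suf : List (String × String)) (label : String) (acc : List Char)
    (hd : data = pre ++ suf) (hnd : (data.map Prod.fst).Nodup) :
    pvGcaLoop (PySem.Dict.mk data) (data.map Prod.fst) label (suf.map (·.1)) acc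
      = (acc ++ (suf.takeWhile (fun p => p.2 == label)).flatMap (fun p => ' ' :: p.1.toList),
         match suf.dropWhile (fun p => p.2 == label) with
         | [] => -1
         | _ => ((pre.length + (suf.takeWhile (fun p => p.2 == label)).length : Nat) : Int)) := by
  induction suf generalizing pre acc with
  | nil => simp [pvGcaLoop]
  | cons p t ih =>
      have hmem : p ∈ data := by rw [hd]; simp
      have hget : (PySem.Dict.mk data).getD p.1 "" = p.2 :=
        pvGetD_eq data p.1 p.2 hnd (by simpa using hmem)
      simp only [List.map_cons, pvGcaLoop, hget]
      by_cases hb : (p.2 == label) = true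
      · rw [if_pos hb, ih (pre ++ [p]) (acc ++ [' '] ++ p.1.toList) (by rw [hd]; simp)]
        simp only [List.takeWhile_cons, List.dropWhile_cons, hb, if_true]
        rcases h' : t.dropWhile (fun q => q.2 == label) with _ | ⟨q, rest⟩
        · simp [h']
        · simp [h', List.flatMap_cons]
          ring
      · rw [if_neg hb]
        have hnd' : (pre.map Prod.fst ++ p.1 :: t.map Prod.fst).Nodup := by
          have := hnd; rw [hd] at this; simpa using this
        have hnm : p.1 ∉ pre.map Prod.fst := fun hm2 =>
          (List.disjoint_of_nodup_append hnd') hm2 (List.mem_cons_self)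
        have hidx : PySem.List.index? (data.map Prod.fst) p.1 = some pre.length :=
          (PySem.List.index?_eq_some_iff _ _ _).mpr
            ⟨pre.map Prod.fst, t.map Prod.fst, by rw [hd]; simp, by simp, hnm⟩
        rw [List.takeWhile_cons, List.dropWhile_cons, if_neg hb, if_neg hb, hidx]
        simp

-- ---- A's get_correct_attribute at the head of a run ----

theorem pvGca_spec (data pre tail : List (String × String)) (k v : String)
    (hd : data = pre ++ (k, v) :: tail) (hnd : (data.map Prod.fst).Nodup) :
    get_correct_attribute k data
      = ((pvSeqOf (k :: (tail.takeWhile (fun p => p.2 == v)).map (·.1)), v),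
         match tail.dropWhile (fun p => p.2 == v) with
         | [] => -1
         | _ => ((pre.length + 1 + (tail.takeWhile (fun p => p.2 == v)).length : Nat) : Int)) := by
  have hmem : (k, v) ∈ data := by rw [hd]; simp
  have hget : (PySem.Dict.mk data).getD k "" = v := pvGetD_eq data k v hnd hmem
  have hnd' : (pre.map Prod.fst ++ k :: tail.map Prod.fst).Nodup := by
    have := hnd; rw [hd] at this; simpa using this
  have hnm : k ∉ pre.map Prod.fst := fun hm2 =>
    (List.disjoint_of_nodup_append hnd') hm2 (List.mem_cons_self)
  have hidx : PySem.List.index? (data.map Prod.fst) k = some pre.length :=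
    (PySem.List.index?_eq_some_iff _ _ _).mpr
      ⟨pre.map Prod.fst, tail.map Prod.fst, by rw [hd]; simp, by simp, hnm⟩
  have hdrop : (data.map Prod.fst).drop pre.length = ((k, v) :: tail).map (·.1) := by
    rw [hd, List.map_append]
    exact List.drop_left' (by simp)
  rw [get_correct_attribute, pvKeys_eq, hget, hidx]
  simp only [Option.getD_some, hdrop]
  rw [pvGcaLoop_spec data pre ((k, v) :: tail) v [] hd hnd]
  have hflat : ∀ l : List (String × String),
      l.flatMap (fun p => ' ' :: p.1.toList) = (l.map (·.1)).flatMap (fun s => ' ' :: s.toList) := by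
    intro l; rw [List.flatMap_map]
  simp only [List.takeWhile_cons, List.dropWhile_cons, beq_self_eq_true, if_true, List.nil_append]
  rw [Prod.mk.injEq, Prod.mk.injEq]
  refine ⟨⟨?_, rfl⟩, ?_⟩
  · rw [← pvSeq_eq]; simp [List.flatMap_cons, hflat]
  · rcases h' : tail.dropWhile (fun q => q.2 == v) with _ | ⟨q, rest⟩
    · simp [h']
    · simp [h']
      ring

-- ---- A's while loop is pvRuns ----

theorem pvGsaLoop_spec (data : List (String × String)) (fuel : Nat) :
    ∀ (pre tail : List (String × String)) (k v : String) (out : PySem.Dict String (List String)),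
      data = pre ++ (k, v) :: tail → (data.map Prod.fst).Nodup → tail.length < fuel →
      pvGsaLoop data out k fuel = pvRuns out [k] v tail := by
  induction fuel with
  | zero => intro pre tail k v out hd hnd hf; omega
  | succ f ih =>
    intro pre tail k v out hd hnd hf
    rw [pvGsaLoop, pvGca_spec data pre tail k v hd hnd, pvRuns]
    rcases h' : tail.dropWhile (fun p => p.2 == v) with _ | ⟨⟨k2, v2⟩, t2⟩
    · simp only [h']
      rw [if_pos (by decide), pvRunsGo]
      simp
    · have htl : tail = tail.takeWhile (fun p => p.2 == v) ++ (k2, v2) :: t2 := by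
        conv_lhs => rw [← List.takeWhile_append_dropWhile (p := fun p => p.2 == v) (l := tail)]
        rw [h']
      have hd2 : data = (pre ++ (k, v) :: tail.takeWhile (fun p => p.2 == v)) ++ (k2, v2) :: t2 := by
        rw [hd]; conv_lhs => rw [htl]
        simp
      have hlen : tail.length = (tail.takeWhile (fun p => p.2 == v)).length + t2.length + 1 := by
        conv_lhs => rw [htl]
        simp
        omega
      have hlen1 : (List.map Prod.fst (pre ++ (k, v) :: tail.takeWhile (fun p => p.2 == v))).length
          = pre.length + 1 + (tail.takeWhile (fun p => p.2 == v)).length := by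
        simp
        omega
      have hget2 : (PySem.List.pyGet? (data.map Prod.fst)
          ((pre.length + 1 + (tail.takeWhile (fun p => p.2 == v)).length : Nat) : Int)).getD "" = k2 := by
        rw [PySem.List.pyGet?_natCast, hd2, List.map_append,
          List.getElem?_append_right (le_of_eq hlen1), hlen1]
        simp
      have hne : ¬(((pre.length + 1 + (tail.takeWhile (fun p => p.2 == v)).length : Nat) : Int) == -1) = true := by
        simp only [beq_iff_eq]
        omega
      simp only [h']
      rw [pvKeys_eq, hget2, if_neg hne]
      rw [ih (pre ++ (k, v) :: tail.takeWhile (fun p => p.2 == v)) t2 k2 v2 _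
        (by rw [hd2]) hnd (by omega)]
      rw [pvRunsGo, pvRuns]
      simp

-- ---- B's fold is pvRuns ----

theorem pvFold_spec (suf : List (String × String)) :
    ∀ (out : PySem.Dict String (List String)) (run : List String) (label : String), run ≠ [] →
      (fun st => pvFlush st.1 st.2.1 st.2.2) (suf.foldl pvStep (out, run, label))
        = pvRuns out run label suf := by
  induction suf with
  | nil =>
      intro out run label hrun
      rw [List.foldl_nil, pvRuns]
      simp only [List.takeWhile_nil, List.dropWhile_nil, List.map_nil, List.append_nil]
      rw [pvRunsGo, pvFlush, if_neg hrun]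
      simp only [pvSeqOf]
  | cons p t ih =>
      obtain ⟨k, w⟩ := p
      intro out run label hrun
      rw [List.foldl_cons]
      by_cases hb : (w == label) = true
      · have hstep : pvStep (out, run, label) (k, w) = (out, run ++ [k], label) := by
          simp [pvStep, hrun, hb]
        rw [hstep, ih _ _ _ (by simp), pvRuns, pvRuns]
        rw [List.takeWhile_cons_of_pos (by simpa using hb),
          List.dropWhile_cons_of_pos (by simpa using hb)]
        simp
      · have hstep : pvStep (out, run, label) (k, w) = (pvFlush out run label, [k], w) := by
          simp [pvStep, hb]
        rw [hstep, ih _ _ _ (by simp), pvRuns, pvRuns]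
        rw [List.takeWhile_cons_of_neg (by simpa using hb),
          List.dropWhile_cons_of_neg (by simpa using hb), pvRunsGo]
        rw [pvFlush, if_neg hrun]
        simp only [pvSeqOf, List.map_nil, List.append_nil, List.singleton_append]

-- ===== VERDICT (by name: the statement is the Claim_ definition above) =====
theorem get_seq_attributes_spec : Claim_equal_get_seq_attributes := by
  intro data hdom hpre
  obtain ⟨hne, hnd⟩ := hpre
  obtain ⟨⟨k, v⟩, t, rfl⟩ : ∃ p t, data = p :: t := by
    cases data with
    | nil => exact absurd rfl hne
    | cons p t => exact ⟨p, t, rfl⟩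
  have htgt : (PySem.List.pyGet? ((PySem.Dict.mk ((k, v) :: t)).keys) 0).getD "" = k := by
    rw [pvKeys_eq, show (0 : Int) = ((0 : Nat) : Int) from rfl, PySem.List.pyGet?_natCast]
    rfl
  have hA := pvGsaLoop_spec ((k, v) :: t) (((k, v) :: t).length + 1) [] t k v
    PySem.Dict.empty rfl hnd (by simp)
  have hstep : pvStep (PySem.Dict.empty, [], "") (k, v) = (PySem.Dict.empty, [k], v) := by
    simp [pvStep, pvFlush]
  have hB := pvFold_spec t PySem.Dict.empty [k] v (by simp)
  beta_reduce at hB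
  show get_seq_attributes ((k, v) :: t) = get_seq_attributes_alt ((k, v) :: t)
  rw [get_seq_attributes, get_seq_attributes_alt]
  rw [htgt, hA, List.foldl_cons, hstep, hB]

def get_seq_attributes_raises : Claim_raises_get_seq_attributes := by
  unfold Claim_raises_get_seq_attributes
  exact ⟨fun data _ hr hp => hp.1 hr, by decide⟩
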